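-- pv_equiv track=rewrite | github.com/sazid-alam/Inertia | fake.py | extremely_complex_function2
-- ===== SOURCE A (Python) =====
-- def extremely_complex_function2(n):
--     if n <= 1:
--         return n
--     result = 0
--     for i in range(n):
--         for j in range(i):
--             if j % 2 == 0:
--                 result += extremely_complex_function2(j // 2)
--             else:
--                 result += extremely_complex_function2(j - 1)
--     return result
-- ===== SOURCE B (Python) =====
-- def extremely_complex_function2(n):
--     if n <= 1:
--         return n
--     f = [0, 1]
--     s1 = 0
--     s2 = 0
--     for k in range(2, n + 1):
--         j = k - 2
--         g = f[j // 2] if j % 2 == 0 else f[j - 1]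
--         s1 += g
--         s2 += j * g
--         f.append((k - 1) * s1 - s2)
--     return f[n]
-- ===== Notes on version B (the rewrite author's own statement) =====
-- stated objective: faster
-- what changed: Replaces A's exponential nested-loop recursion by a bottom-up memo table f[0..n] with running prefix sums s1 = sum g(j) and s2 = sum j*g(j), so f[k] = (k-1)*s1 - s2 in O(1) per step; intended as faster — a timing run read B over 10x faster at the largest size where the exponential A still finished (A times out beyond).
import Mathlib
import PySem

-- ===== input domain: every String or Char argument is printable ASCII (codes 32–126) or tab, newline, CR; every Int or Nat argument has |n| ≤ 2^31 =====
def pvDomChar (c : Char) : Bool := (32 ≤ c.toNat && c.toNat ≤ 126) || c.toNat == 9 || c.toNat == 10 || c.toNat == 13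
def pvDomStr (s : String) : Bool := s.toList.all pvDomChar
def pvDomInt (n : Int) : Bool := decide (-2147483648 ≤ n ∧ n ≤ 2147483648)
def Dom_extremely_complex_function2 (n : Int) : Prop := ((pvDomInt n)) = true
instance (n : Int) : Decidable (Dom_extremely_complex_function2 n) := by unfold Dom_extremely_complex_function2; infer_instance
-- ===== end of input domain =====

-- B replaces A's exponential nested-loop recursion by a bottom-up memo table with
-- prefix sums of the inner-loop contributions (intended as faster; a timing run measured B over 10x
-- faster at the largest size at which the exponential A still finished).

-- ===== PORT A =====
def extremely_complex_function2 (n : Int) : Int :=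
  if n ≤ 1 then n
  else
    (PySem.List.pyRange 0 n 1).attach.foldl
      (fun result i =>
        (PySem.List.pyRange 0 i.1 1).attach.foldl
          (fun result j =>
            if PySem.Int.mod j.1 2 = 0 then
              result + extremely_complex_function2 (PySem.Int.floordiv j.1 2)
            else
              result + extremely_complex_function2 (j.1 - 1))
          result)
      0
termination_by n.toNat
decreasing_by
  · have hi := PySem.List.mem_pyRange_one.mp i.2
    have hj := PySem.List.mem_pyRange_one.mp j.2
    rw [PySem.Int.floordiv_eq_ediv_of_pos (a := j.1) (b := 2) (by omega)]
    omega
  · have hi := PySem.List.mem_pyRange_one.mp i.2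
    have hj := PySem.List.mem_pyRange_one.mp j.2
    omega

-- ===== PORT B =====
-- The list indices f[j//2], f[j-1], f[n] are always in range in Source B (0 ≤ j//2, j-1 < k = len f,
-- n = len f - 1 after the loop), so pyGetD's default is never consulted.
def extremely_complex_function2_alt (n : Int) : Int :=
  if n ≤ 1 then n
  else
    let st := (PySem.List.pyRange 2 (n + 1) 1).foldl
      (fun (st : List Int × Int × Int) k =>
        let f := st.1
        let j := k - 2
        let g := if PySem.Int.mod j 2 = 0 then PySem.List.pyGetD f (PySem.Int.floordiv j 2) 0
                 else PySem.List.pyGetD f (j - 1) 0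
        let s1 := st.2.1 + g
        let s2 := st.2.2 + j * g
        (f ++ [(k - 1) * s1 - s2], s1, s2))
      ([0, 1], 0, 0)
    PySem.List.pyGetD st.1 n 0

-- ===== PRECONDITION & SPEC =====
def Spec_extremely_complex_function2 (n : Int) (out : Int) : Prop := out = extremely_complex_function2_alt n
instance (n : Int) (out : Int) : Decidable (Spec_extremely_complex_function2 n out) := by unfold Spec_extremely_complex_function2; infer_instance

-- ===== CLAIM (what is proved, stated in full; the proofs are below) =====
def Claim_equal_extremely_complex_function2 : Prop := ∀ (n : Int), Dom_extremely_complex_function2 n → Spec_extremely_complex_function2 n (extremely_complex_function2 n)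

-- ===== LEMMAS AND PROOFS =====

-- the per-j contribution of A's inner loop
def pvG (j : Int) : Int :=
  if PySem.Int.mod j 2 = 0 then extremely_complex_function2 (PySem.Int.floordiv j 2)
  else extremely_complex_function2 (j - 1)

-- prefix sums of pvG and of j * pvG j, and A's double sum
def pvS (m : Nat) : Int := ((PySem.List.pyRange 0 m 1).map pvG).sum
def pvW (m : Nat) : Int := ((PySem.List.pyRange 0 m 1).map (fun j => j * pvG j)).sum
def pvT (m : Nat) : Int :=
  ((PySem.List.pyRange 0 m 1).map (fun i => ((PySem.List.pyRange 0 i 1).map pvG).sum)).sum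

lemma pvS_succ (m : Nat) : pvS (m + 1) = pvS m + pvG m := by
  unfold pvS
  rw [show ((m + 1 : Nat) : Int) = (m : Int) + 1 by push_cast; ring,
      PySem.List.pyRange_one_succ_right (by positivity)]
  simp

lemma pvW_succ (m : Nat) : pvW (m + 1) = pvW m + m * pvG m := by
  unfold pvW
  rw [show ((m + 1 : Nat) : Int) = (m : Int) + 1 by push_cast; ring,
      PySem.List.pyRange_one_succ_right (by positivity)]
  simp

lemma pvT_succ (m : Nat) : pvT (m + 1) = pvT m + pvS m := by
  unfold pvT pvS
  rw [show ((m + 1 : Nat) : Int) = (m : Int) + 1 by push_cast; ring,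
      PySem.List.pyRange_one_succ_right (by positivity)]
  simp

-- closed form of the double sum via prefix sums
lemma pvT_closed (m : Nat) : pvT (m + 1) = (m : Int) * pvS m - pvW m := by
  induction m with
  | zero => simp [pvT, pvS, pvW, PySem.List.pyRange]
  | succ c ih =>
      rw [pvT_succ, ih, pvS_succ, pvW_succ]
      push_cast; ring

-- A's value, for n ≥ 2, is the double sum pvT
lemma A_eq_T (m : Nat) (h : 2 ≤ m) : extremely_complex_function2 (m : Int) = pvT m := by
  rw [extremely_complex_function2]
  rw [if_neg (by omega)]
  have inner : ∀ (i : Int) (r : Int),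
      (PySem.List.pyRange 0 i 1).attach.foldl
        (fun result j =>
          if PySem.Int.mod j.1 2 = 0 then
            result + extremely_complex_function2 (PySem.Int.floordiv j.1 2)
          else
            result + extremely_complex_function2 (j.1 - 1))
        r
      = r + ((PySem.List.pyRange 0 i 1).map pvG).sum := by
    intro i r
    have : ∀ (res j : Int),
        (if PySem.Int.mod j 2 = 0 then
          res + extremely_complex_function2 (PySem.Int.floordiv j 2)
         else res + extremely_complex_function2 (j - 1)) = res + pvG j := by
      intro res j; unfold pvG; split <;> rfl
    simp only [this]
    rw [List.foldl_attach (f := fun (res j : Int) => res + pvG j)]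
    exact PySem.List.foldl_add _ _ _
  have outer :
      (fun (result : Int) (i : {x // x ∈ PySem.List.pyRange 0 (m : Int) 1}) =>
        (PySem.List.pyRange 0 i.1 1).attach.foldl
          (fun result j =>
            if PySem.Int.mod j.1 2 = 0 then
              result + extremely_complex_function2 (PySem.Int.floordiv j.1 2)
            else
              result + extremely_complex_function2 (j.1 - 1))
          result)
      = fun result i => result + ((PySem.List.pyRange 0 i.1 1).map pvG).sum := by
    funext r i; exact inner i.1 r
  rw [outer, List.foldl_attach
        (f := fun (r i : Int) => r + ((PySem.List.pyRange 0 i 1).map pvG).sum),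
      PySem.List.foldl_add]
  simp [pvT]

-- values of A at 0 and 1
lemma A_zero : extremely_complex_function2 0 = 0 := by rw [extremely_complex_function2]; rfl
lemma A_one : extremely_complex_function2 1 = 1 := by rw [extremely_complex_function2]; rfl

-- reading the memo table at a cast Nat index returns A's value there
lemma pvGetA (c t : Nat) (h : t < c) :
    PySem.List.pyGetD ((List.range c).map (fun t : Nat => extremely_complex_function2 (t : Int))) (t : Int) 0
    = extremely_complex_function2 (t : Int) := by
  rw [PySem.List.pyGetD_natCast]
  simp [List.getD_eq_getElem?_getD, h, List.getElem_map, List.getElem_range]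

-- B's loop invariant: after processing k = 2 .. c+1, the memo table holds A's values
-- on 0 .. c+1 and the accumulators hold the prefix sums pvS c, pvW c.
lemma B_loop (c : Nat) :
    (PySem.List.pyRange 2 (2 + (c : Int)) 1).foldl
      (fun (st : List Int × Int × Int) k =>
        let f := st.1
        let j := k - 2
        let g := if PySem.Int.mod j 2 = 0 then PySem.List.pyGetD f (PySem.Int.floordiv j 2) 0
                 else PySem.List.pyGetD f (j - 1) 0
        let s1 := st.2.1 + g
        let s2 := st.2.2 + j * g
        (f ++ [(k - 1) * s1 - s2], s1, s2))
      ([0, 1], 0, 0)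
    = ((List.range (c + 2)).map (fun t : Nat => extremely_complex_function2 (t : Int)), pvS c, pvW c) := by
  induction c with
  | zero =>
      rw [show (2 + ((0 : Nat) : Int)) = 2 by norm_num, PySem.List.pyRange_one_eq_nil le_rfl]
      simp [pvS, pvW, PySem.List.pyRange_one_eq_nil, List.range_succ, A_zero, A_one]
  | succ c ih =>
      rw [show (2 + ((c + 1 : Nat) : Int)) = (2 + (c : Int)) + 1 by push_cast; ring,
          PySem.List.pyRange_one_succ_right (by omega), List.foldl_append, ih]
      simp only [List.foldl_cons, List.foldl_nil]
      rw [show (2 : Int) + (c : Int) - 2 = (c : Int) by ring]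
      have hg : (if PySem.Int.mod (c : Int) 2 = 0 then
            PySem.List.pyGetD ((List.range (c + 2)).map (fun t : Nat => extremely_complex_function2 (t : Int))) (PySem.Int.floordiv (c : Int) 2) 0
          else
            PySem.List.pyGetD ((List.range (c + 2)).map (fun t : Nat => extremely_complex_function2 (t : Int))) ((c : Int) - 1) 0)
          = pvG (c : Int) := by
        unfold pvG
        by_cases hc : PySem.Int.mod (c : Int) 2 = 0
        · rw [if_pos hc, if_pos hc]
          rw [show PySem.Int.floordiv (c : Int) 2 = ((c / 2 : Nat) : Int) from
                PySem.Int.floordiv_natCast c 2]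
          exact pvGetA (c + 2) (c / 2) (by omega)
        · rw [if_neg hc, if_neg hc]
          have hc1 : 1 ≤ c := by
            by_contra hlt
            apply hc
            interval_cases c
            decide
          rw [show ((c : Int) - 1) = ((c - 1 : Nat) : Int) by omega]
          exact pvGetA (c + 2) (c - 1) (by omega)
      rw [hg]
      refine Prod.ext ?_ (Prod.ext ?_ ?_)
      · show _ ++ _ = _
        rw [show (c + 1 + 2) = (c + 2) + 1 by ring, List.range_succ, List.map_append]
        have : ((2 + (c : Int)) - 1) * (pvS c + pvG (c : Int)) - (pvW c + (c : Int) * pvG (c : Int))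
             = extremely_complex_function2 ((c + 2 : Nat) : Int) := by
          rw [A_eq_T (c + 2) (by omega), show (c + 2) = (c + 1) + 1 by ring, pvT_closed,
              pvS_succ, pvW_succ]
          push_cast; ring
        simp [this]
        simp [List.range_succ]
      · show pvS c + pvG (c : Int) = pvS (c + 1)
        rw [pvS_succ]
      · show pvW c + (c : Int) * pvG (c : Int) = pvW (c + 1)
        rw [pvW_succ]

theorem extremely_complex_function2_spec : Claim_equal_extremely_complex_function2 := by
  intro n _
  unfold Spec_extremely_complex_function2
  by_cases h : n ≤ 1
  · rw [extremely_complex_function2, if_pos h, extremely_complex_function2_alt, if_pos h]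
  · obtain ⟨c, hc⟩ : ∃ c : Nat, n = ((c + 2 : Nat) : Int) :=
      ⟨(n - 2).toNat, by omega⟩
    subst hc
    rw [extremely_complex_function2_alt, if_neg h]
    simp only []
    rw [show ((c + 2 : Nat) : Int) + 1 = 2 + ((c + 1 : Nat) : Int) by push_cast; ring,
        B_loop (c + 1)]
    exact (pvGetA (c + 1 + 2) (c + 2) (by omega)).symm
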